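-- pv_equiv track=rewrite | github.com/puter2/Advent-of-code-2025 | day9/part2.py | does_rectangle_stay_inside
-- ===== SOURCE A (Python) =====
-- def does_rectangle_stay_inside(outside_borders, corner1, corner2):
--     x1, y1 = corner1
--     x2, y2 = corner2
--     for i in range(min(x1, x2), max(x1, x2)):
--         if (i, y1) in outside_borders or (i, y2) in outside_borders:
--             return False
--     for i in range(min(y1, y2), max(y1, y2)):
--         if (x1, i) in outside_borders or (x2, i) in outside_borders:
--             return False
--     return True
-- ===== SOURCE B (Python) =====
-- def does_rectangle_stay_inside(outside_borders, corner1, corner2):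
--     x1, y1 = corner1
--     x2, y2 = corner2
--     for (bx, by) in outside_borders:
--         if min(x1, x2) <= bx < max(x1, x2) and (by == y1 or by == y2):
--             return False
--         if min(y1, y2) <= by < max(y1, y2) and (bx == x1 or bx == x2):
--             return False
--     return True
-- ===== Notes on version B (the rewrite author's own statement) =====
-- stated objective: faster
-- what changed: B iterates once over the border-point set and tests each point against the rectangle's edge segments with geometric range predicates, instead of sweeping every integer coordinate of the perimeter and doing membership lookups in the list.
import Mathlib
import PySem

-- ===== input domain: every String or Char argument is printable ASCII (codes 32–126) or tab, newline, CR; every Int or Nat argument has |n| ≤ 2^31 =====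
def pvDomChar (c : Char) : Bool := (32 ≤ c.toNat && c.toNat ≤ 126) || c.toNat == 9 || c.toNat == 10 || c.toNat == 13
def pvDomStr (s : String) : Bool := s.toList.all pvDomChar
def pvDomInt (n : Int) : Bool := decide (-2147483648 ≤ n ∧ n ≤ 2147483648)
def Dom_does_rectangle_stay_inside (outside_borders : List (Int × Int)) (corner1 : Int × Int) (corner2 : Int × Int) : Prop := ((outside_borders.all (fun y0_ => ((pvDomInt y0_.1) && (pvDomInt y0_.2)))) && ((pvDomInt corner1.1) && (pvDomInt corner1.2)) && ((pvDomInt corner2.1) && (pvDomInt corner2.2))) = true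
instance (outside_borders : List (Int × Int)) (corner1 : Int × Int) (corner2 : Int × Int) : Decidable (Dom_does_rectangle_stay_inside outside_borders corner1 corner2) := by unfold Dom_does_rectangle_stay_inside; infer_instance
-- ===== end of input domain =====

-- B iterates once over the border-point set with geometric edge predicates instead of sweeping every perimeter coordinate and looking it up in the list (alternative decomposition).\nimport Mathlib


-- ===== PORT A =====
def does_rectangle_stay_inside (outside_borders : List (Int × Int)) (corner1 : Int × Int) (corner2 : Int × Int) : Bool :=
  let x1 := corner1.1; let y1 := corner1.2
  let x2 := corner2.1; let y2 := corner2.2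
  if (PySem.List.pyRange (min x1 x2) (max x1 x2) 1).any
      (fun i => outside_borders.contains (i, y1) || outside_borders.contains (i, y2)) then
    false
  else if (PySem.List.pyRange (min y1 y2) (max y1 y2) 1).any
      (fun i => outside_borders.contains (x1, i) || outside_borders.contains (x2, i)) then
    false
  else
    true

-- ===== PORT B =====
def does_rectangle_stay_inside_alt (outside_borders : List (Int × Int)) (corner1 : Int × Int) (corner2 : Int × Int) : Bool :=
  let x1 := corner1.1; let y1 := corner1.2
  let x2 := corner2.1; let y2 := corner2.2
  !(outside_borders.any (fun p =>
      (decide (min x1 x2 ≤ p.1) && decide (p.1 < max x1 x2) && (p.2 == y1 || p.2 == y2)) ||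
      (decide (min y1 y2 ≤ p.2) && decide (p.2 < max y1 y2) && (p.1 == x1 || p.1 == x2))))

-- ===== PRECONDITION & SPEC =====
def Spec_does_rectangle_stay_inside (outside_borders : List (Int × Int)) (corner1 : Int × Int) (corner2 : Int × Int) (out : Bool) : Prop := out = does_rectangle_stay_inside_alt outside_borders corner1 corner2
instance (outside_borders : List (Int × Int)) (corner1 : Int × Int) (corner2 : Int × Int) (out : Bool) : Decidable (Spec_does_rectangle_stay_inside outside_borders corner1 corner2 out) := by unfold Spec_does_rectangle_stay_inside; infer_instance

-- ===== CLAIM (what is proved, stated in full; the proofs are below) =====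
def Claim_equal_does_rectangle_stay_inside : Prop := ∀ (outside_borders : List (Int × Int)) (corner1 : Int × Int) (corner2 : Int × Int), Dom_does_rectangle_stay_inside outside_borders corner1 corner2 → Spec_does_rectangle_stay_inside outside_borders corner1 corner2 (does_rectangle_stay_inside outside_borders corner1 corner2)

-- ===== LEMMAS AND PROOFS =====

-- a two-branch early-return over bools is the negation of their disjunction
theorem pv_if_if_not (a b : Bool) :
    (if a then false else if b then false else true) = !(a || b) := by
  cases a <;> cases b <;> rfl

-- ===== VERDICT (by name: the statement is the Claim_ definition above) =====
theorem does_rectangle_stay_inside_spec : Claim_equal_does_rectangle_stay_inside := by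
  intro ob c1 c2 _
  obtain ⟨x1, y1⟩ := c1
  obtain ⟨x2, y2⟩ := c2
  unfold Spec_does_rectangle_stay_inside does_rectangle_stay_inside does_rectangle_stay_inside_alt
  simp only []
  rw [pv_if_if_not]
  suffices h :
      (((PySem.List.pyRange (min x1 x2) (max x1 x2) 1).any
          (fun i => ob.contains (i, y1) || ob.contains (i, y2))) ||
        ((PySem.List.pyRange (min y1 y2) (max y1 y2) 1).any
          (fun i => ob.contains (x1, i) || ob.contains (x2, i)))) =
      (ob.any (fun p =>
        (decide (min x1 x2 ≤ p.1) && decide (p.1 < max x1 x2) && (p.2 == y1 || p.2 == y2)) ||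
        (decide (min y1 y2 ≤ p.2) && decide (p.2 < max y1 y2) && (p.1 == x1 || p.1 == x2)))) by
    rw [h]
  rw [Bool.eq_iff_iff]
  simp only [Bool.or_eq_true, Bool.and_eq_true, List.any_eq_true,
    PySem.List.mem_pyRange_one, List.contains_iff_mem, decide_eq_true_eq, beq_iff_eq]
  constructor
  · rintro (⟨i, ⟨hlo, hhi⟩, (hm | hm)⟩ | ⟨i, ⟨hlo, hhi⟩, (hm | hm)⟩)
    · exact ⟨(i, y1), hm, Or.inl ⟨⟨hlo, hhi⟩, Or.inl rfl⟩⟩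
    · exact ⟨(i, y2), hm, Or.inl ⟨⟨hlo, hhi⟩, Or.inr rfl⟩⟩
    · exact ⟨(x1, i), hm, Or.inr ⟨⟨hlo, hhi⟩, Or.inl rfl⟩⟩
    · exact ⟨(x2, i), hm, Or.inr ⟨⟨hlo, hhi⟩, Or.inr rfl⟩⟩
  · rintro ⟨⟨bx, by'⟩, hm, (⟨⟨hlo, hhi⟩, (h | h)⟩ | ⟨⟨hlo, hhi⟩, (h | h)⟩)⟩
    · exact Or.inl ⟨bx, ⟨hlo, hhi⟩, Or.inl (by rw [← h]; exact hm)⟩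
    · exact Or.inl ⟨bx, ⟨hlo, hhi⟩, Or.inr (by rw [← h]; exact hm)⟩
    · exact Or.inr ⟨by', ⟨hlo, hhi⟩, Or.inl (by rw [← h]; exact hm)⟩
    · exact Or.inr ⟨by', ⟨hlo, hhi⟩, Or.inr (by rw [← h]; exact hm)⟩
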